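-- pv_equiv track=rewrite | github.com/brylaue/dynasty-agent | app/services/news_aggregator.py | filter_news_by_names
-- ===== SOURCE A (Python) =====
-- from typing import Any, Dict, List
--
-- def filter_news_by_names(items: List[Dict[str, Any]], names: List[str]) -> List[Dict[str, Any]]:
-- 	norm_names = [n.lower() for n in names if n]
-- 	filtered: List[Dict[str, Any]] = []
-- 	for it in items:
-- 		t = (it.get("title") or "").lower()
-- 		d = (it.get("description") or "").lower()
-- 		if any(n in t or n in d for n in norm_names):
-- 			filtered.append(it)
-- 	return filtered
-- ===== SOURCE B (Python) =====
-- from typing import Any, Dict, List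
--
--
-- def filter_news_by_names(items: List[Dict[str, Any]], names: List[str]) -> List[Dict[str, Any]]:
--     # Swap the loops: precompute each item's lowered (title, description) once,
--     # then sweep the names over a boolean hit-mask, and keep the marked items.
--     texts = [((it.get("title") or "").lower(), (it.get("description") or "").lower()) for it in items]
--     hit = [False] * len(items)
--     for n in names:
--         if n:
--             p = n.lower()
--             hit = [h or p in t or p in d for h, (t, d) in zip(hit, texts)]
--     return [it for it, h in zip(items, hit) if h]
-- ===== Notes on version B (the rewrite author's own statement) =====
-- stated objective: alternative
-- what changed: B inverts the loop nesting: it precomputes each item's lowered (title, description) pair once, sweeps each non-empty name over a boolean hit-mask of the items, and finally keeps the marked items, instead of A's per-item scan over all normalized names with append.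
import Mathlib
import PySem

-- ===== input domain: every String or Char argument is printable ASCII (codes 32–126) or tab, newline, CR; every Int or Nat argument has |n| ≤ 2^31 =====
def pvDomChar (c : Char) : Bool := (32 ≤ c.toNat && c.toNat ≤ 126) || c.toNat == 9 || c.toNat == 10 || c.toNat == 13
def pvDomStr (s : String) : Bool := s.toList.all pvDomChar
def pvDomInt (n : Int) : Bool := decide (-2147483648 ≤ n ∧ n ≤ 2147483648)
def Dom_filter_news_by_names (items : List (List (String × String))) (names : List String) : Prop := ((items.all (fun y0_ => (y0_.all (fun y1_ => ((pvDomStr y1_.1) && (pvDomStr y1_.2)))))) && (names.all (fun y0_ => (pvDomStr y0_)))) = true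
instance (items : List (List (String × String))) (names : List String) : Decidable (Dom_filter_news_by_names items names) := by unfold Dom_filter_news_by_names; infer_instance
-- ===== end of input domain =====

-- B inverts the loop nesting (items-pass precomputing lowered texts, then a names-pass over a
-- boolean hit-mask, then keep the marked items); same cost, alternative structure.

-- ===== PORT A =====
def filter_news_by_names (items : List (List (String × String))) (names : List String) : List (List (String × String)) :=
  let norm := (names.filter (fun n => n != "")).map PySem.Str.lower
  items.foldl (fun filtered it =>
    let t := PySem.Str.lower (PySem.Dict.getD (PySem.Dict.ofList it) "title" "")
    let d := PySem.Str.lower (PySem.Dict.getD (PySem.Dict.ofList it) "description" "")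
    if norm.any (fun n => PySem.Str.isIn n t || PySem.Str.isIn n d) then filtered ++ [it]
    else filtered) []

-- ===== PORT B =====
def filter_news_by_names_alt (items : List (List (String × String))) (names : List String) : List (List (String × String)) :=
  let texts := items.map (fun it =>
    (PySem.Str.lower (PySem.Dict.getD (PySem.Dict.ofList it) "title" ""),
     PySem.Str.lower (PySem.Dict.getD (PySem.Dict.ofList it) "description" "")))
  let hit := names.foldl (fun hit n =>
    if n != "" then
      let p := PySem.Str.lower n
      List.zipWith (fun h td => h || (PySem.Str.isIn p td.1 || PySem.Str.isIn p td.2)) hit texts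
    else hit) (List.replicate items.length false)
  ((items.zip hit).filter (fun x => x.2)).map (fun x => x.1)

-- ===== PRECONDITION & SPEC =====
def Spec_filter_news_by_names (items : List (List (String × String))) (names : List String) (out : List (List (String × String))) : Prop := out = filter_news_by_names_alt items names
instance (items : List (List (String × String))) (names : List String) (out : List (List (String × String))) : Decidable (Spec_filter_news_by_names items names out) := by unfold Spec_filter_news_by_names; infer_instance

-- ===== CLAIM (what is proved, stated in full; the proofs are below) =====
def Claim_equal_filter_news_by_names : Prop := ∀ (items : List (List (String × String))) (names : List String), Dom_filter_news_by_names items names → Spec_filter_news_by_names items names (filter_news_by_names items names)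

-- ===== LEMMAS AND PROOFS =====

-- the lowered (title, description) pair of an item
def pvText (it : List (String × String)) : String × String :=
  (PySem.Str.lower (PySem.Dict.getD (PySem.Dict.ofList it) "title" ""),
   PySem.Str.lower (PySem.Dict.getD (PySem.Dict.ofList it) "description" ""))

-- A's per-item predicate: some normalized name occurs in the title or description
def pvAnyMatch (names : List String) (td : String × String) : Bool :=
  ((names.filter (fun n => n != "")).map PySem.Str.lower).any
    (fun n => PySem.Str.isIn n td.1 || PySem.Str.isIn n td.2)

theorem pvAnyMatch_cons (n : String) (ns : List String) (td : String × String) :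
    pvAnyMatch (n :: ns) td =
      ((if n != "" then PySem.Str.isIn (PySem.Str.lower n) td.1 || PySem.Str.isIn (PySem.Str.lower n) td.2 else false)
        || pvAnyMatch ns td) := by
  simp only [pvAnyMatch, List.filter_cons]
  by_cases h : n != ""
  · simp [h]
  · simp [h]

theorem zipWith_zipWith_right {α β γ δ : Type} (f : γ → β → δ) (g : α → β → γ)
    (xs : List α) (ys : List β) :
    List.zipWith f (List.zipWith g xs ys) ys = List.zipWith (fun a b => f (g a b) b) xs ys := by
  induction xs generalizing ys with
  | nil => simp
  | cons x xs ih =>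
    cases ys with
    | nil => simp
    | cons y ys => simp [ih]

theorem zipWith_replicate_left {α β : Type} (f : Bool → α → β) (xs : List α) :
    List.zipWith f (List.replicate xs.length false) xs = xs.map (f false) := by
  induction xs with
  | nil => rfl
  | cons x xs ih => simp [List.replicate_succ, ih]

theorem zipWith_fst_of_length_le {α β : Type} (xs : List α) (ys : List β)
    (h : xs.length ≤ ys.length) :
    List.zipWith (fun a _ => a) xs ys = xs := by
  induction xs generalizing ys with
  | nil => simp
  | cons x xs ih =>
    cases ys with
    | nil => simp at h
    | cons y ys => simpa using ih ys (by simpa using h)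

-- the B-side fold over names computes pvAnyMatch pointwise on the hit-mask
theorem foldB_eq (names : List String) (texts : List (String × String)) (hit : List Bool)
    (hlen : hit.length = texts.length) :
    names.foldl (fun hit n =>
      if n != "" then
        List.zipWith (fun h td => h || (PySem.Str.isIn (PySem.Str.lower n) td.1 || PySem.Str.isIn (PySem.Str.lower n) td.2)) hit texts
      else hit) hit
    = List.zipWith (fun h td => h || pvAnyMatch names td) hit texts := by
  induction names generalizing hit with
  | nil =>
    simp only [List.foldl_nil, pvAnyMatch, List.filter_nil, List.map_nil, List.any_nil, Bool.or_false]
    symm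
    exact zipWith_fst_of_length_le hit texts (le_of_eq hlen)
  | cons n ns ih =>
    simp only [List.foldl_cons]
    by_cases h : n != ""
    · rw [if_pos h, ih _ (by simp [hlen]), zipWith_zipWith_right]
      have he : (fun (a : Bool) (b : String × String) =>
          (a || (PySem.Str.isIn (PySem.Str.lower n) b.1 || PySem.Str.isIn (PySem.Str.lower n) b.2)
            || pvAnyMatch ns b))
          = fun a b => a || pvAnyMatch (n :: ns) b := by
        funext a b
        simp [pvAnyMatch_cons, h, Bool.or_assoc]
      rw [he]
    · rw [if_neg h, ih _ hlen]
      have he : (fun (a : Bool) (b : String × String) => a || pvAnyMatch ns b)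
          = fun a b => a || pvAnyMatch (n :: ns) b := by
        funext a b
        simp [pvAnyMatch_cons, h]
      rw [he]

theorem zip_map_filter_map {α : Type} (f : α → Bool) (xs : List α) :
    ((xs.zip (xs.map f)).filter (fun x => x.2)).map (fun x => x.1) = xs.filter f := by
  induction xs with
  | nil => rfl
  | cons x xs ih =>
    simp only [List.map_cons, List.zip_cons_cons, List.filter_cons]
    by_cases h : f x = true
    · simp [h, ih]
    · simp [h, ih]

theorem foldA_eq (items : List (List (String × String))) (p : List (String × String) → Bool)
    (acc : List (List (String × String))) :
    items.foldl (fun filtered it => if p it then filtered ++ [it] else filtered) acc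
      = acc ++ items.filter p := by
  induction items generalizing acc with
  | nil => simp
  | cons it items ih =>
    simp only [List.foldl_cons, List.filter_cons]
    by_cases h : p it = true
    · simp [h, ih]
    · simp [h, ih]

-- ===== VERDICT (by name: the statement is the Claim_ definition above) =====
theorem filter_news_by_names_spec : Claim_equal_filter_news_by_names := by
  intro items names _
  show filter_news_by_names items names = filter_news_by_names_alt items names
  unfold filter_news_by_names filter_news_by_names_alt
  dsimp only
  have hT : (fun it : List (String × String) =>
      (PySem.Str.lower ((PySem.Dict.ofList it).getD "title" ""),
       PySem.Str.lower ((PySem.Dict.ofList it).getD "description" ""))) = pvText := rfl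
  rw [hT]
  rw [foldB_eq names (items.map pvText) (List.replicate items.length false)
        (by simp),
      show List.replicate items.length false = List.replicate (items.map pvText).length false by simp,
      zipWith_replicate_left]
  simp only [List.map_map, Bool.false_or, Function.comp_def]
  rw [zip_map_filter_map (fun it => pvAnyMatch names (pvText it)) items]
  exact (foldA_eq items (fun it => pvAnyMatch names (pvText it)) []).trans (by simp)
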